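-- pv_equiv track=rewrite | github.com/gslavisam/Harmonix_AI | harmonix/core/song_analysis.py | build_bass_harmonic_summary
-- ===== SOURCE A (Python) =====
-- def build_bass_harmonic_summary(
--     bass_bar_overview: list[dict[str, str]],
--     tonal_center: str,
--     cadence_items: list[str],
--     contains_turnaround: bool,
-- ) -> str:
--     if not bass_bar_overview:
--         return "Bass linija jos nije generisana, pa nema sire harmonijske veze za komentar."
--
--     total_bars = len(bass_bar_overview)
--     root_anchors = sum(1 for bar in bass_bar_overview if bar.get("beat_one_role") == "root")
--     guide_tone_bars = sum(1 for bar in bass_bar_overview if "guide tone emphasis" in bar.get("bar_comment", ""))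
--     chromatic_bars = sum(1 for bar in bass_bar_overview if "chromatic" in bar.get("bar_comment", ""))
--     approach_bars = sum(1 for bar in bass_bar_overview if bar.get("beat_four_role") == "approach")
--
--     if root_anchors == total_bars:
--         anchor_text = "Bass linija na prvom beatu svakog takta jasno sidri koren akorda"
--     else:
--         anchor_text = f"Bass linija na prvom beatu potvrdjuje koren u {root_anchors} od {total_bars} taktova"
--
--     if tonal_center and tonal_center != "Nedovoljno podataka":
--         anchor_text += f", pa tonalni centar {tonal_center} ostaje pregledan."
--     else:
--         anchor_text += "."
--
--     if guide_tone_bars: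
--         voice_leading_text = f"Srednji beatovi u {guide_tone_bars} taktova naglasavaju guide tone kretanje, sto pomaze da se funkcija akorda cuje i bez pune pratnje."
--     else:
--         voice_leading_text = "Srednji beatovi vise rade kao stabilna chord-tone podrska nego kao izrazena guide tone linija."
--
--     if cadence_items:
--         cadence_text = f"To posebno podrzava kadencu {cadence_items[0]}."
--     elif contains_turnaround:
--         cadence_text = "Zavrsni tonovi pripremaju turnaround i drze liniju funkcionalno otvorenom."
--     else:
--         cadence_text = "Linija ostaje vise u funkciji stabilizacije harmonije nego eksplicitne kadence."
--
--     if approach_bars: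
--         approach_text = f"U {approach_bars} taktova cetvrti beat radi kao approach ton ka sledecem akordu"
--         if chromatic_bars:
--             approach_text += ", pa prelazi zvuce povezano i usmereno."
--         else:
--             approach_text += ", pa prelazi ostaju glatki."
--     else:
--         approach_text = "Zavrseci taktova ostaju unutar aktuelne harmonije umesto da guraju sledeci akord."
--
--     return " ".join([anchor_text, voice_leading_text, cadence_text, approach_text])
-- ===== SOURCE B (Python) =====
-- def _bar_features(bar):
--     # One 0/1 feature row per bar: (presence, root-anchor, guide-tone, chromatic, approach).
--     comment = bar.get("bar_comment", "")
--     return (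
--         1,
--         1 if bar.get("beat_one_role") == "root" else 0,
--         1 if "guide tone emphasis" in comment else 0,
--         1 if "chromatic" in comment else 0,
--         1 if bar.get("beat_four_role") == "approach" else 0,
--     )
--
--
-- def _anchor_sentence(roots, total, tonal_center):
--     head = (
--         "Bass linija na prvom beatu svakog takta jasno sidri koren akorda"
--         if roots == total
--         else f"Bass linija na prvom beatu potvrdjuje koren u {roots} od {total} taktova"
--     )
--     tail = (
--         f", pa tonalni centar {tonal_center} ostaje pregledan."
--         if tonal_center and tonal_center != "Nedovoljno podataka"
--         else "."
--     )
--     return head + tail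
--
--
-- def _voice_sentence(guides):
--     if guides:
--         return f"Srednji beatovi u {guides} taktova naglasavaju guide tone kretanje, sto pomaze da se funkcija akorda cuje i bez pune pratnje."
--     return "Srednji beatovi vise rade kao stabilna chord-tone podrska nego kao izrazena guide tone linija."
--
--
-- def _cadence_sentence(cadence_items, contains_turnaround):
--     if cadence_items:
--         return f"To posebno podrzava kadencu {cadence_items[0]}."
--     if contains_turnaround:
--         return "Zavrsni tonovi pripremaju turnaround i drze liniju funkcionalno otvorenom."
--     return "Linija ostaje vise u funkciji stabilizacije harmonije nego eksplicitne kadence."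
--
--
-- def _approach_sentence(approaches, chroms):
--     if approaches:
--         return (
--             f"U {approaches} taktova cetvrti beat radi kao approach ton ka sledecem akordu"
--             + (", pa prelazi zvuce povezano i usmereno." if chroms else ", pa prelazi ostaju glatki.")
--         )
--     return "Zavrseci taktova ostaju unutar aktuelne harmonije umesto da guraju sledeci akord."
--
--
-- def build_bass_harmonic_summary(
--     bass_bar_overview: list[dict[str, str]],
--     tonal_center: str,
--     cadence_items: list[str],
--     contains_turnaround: bool,
-- ) -> str:
--     if not bass_bar_overview:
--         return "Bass linija jos nije generisana, pa nema sire harmonijske veze za komentar."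
--
--     # Feature-matrix view: map every bar to a 0/1 feature row, transpose the
--     # matrix, and obtain all five tallies as column sums of that matrix.
--     feature_matrix = [_bar_features(bar) for bar in bass_bar_overview]
--     total, roots, guides, chroms, approaches = (sum(col) for col in zip(*feature_matrix))
--
--     return " ".join(
--         [
--             _anchor_sentence(roots, total, tonal_center),
--             _voice_sentence(guides),
--             _cadence_sentence(cadence_items, contains_turnaround),
--             _approach_sentence(approaches, chroms),
--         ]
--     )
-- ===== Notes on version B (the rewrite author's own statement) =====
-- stated objective: alternative
-- what changed: B recasts the tallying as linear algebra on a feature matrix: each bar is first mapped to a 0/1 feature row (presence, root, guide-tone, chromatic, approach), the matrix is transposed with zip(*) and the five tallies read off as column sums, and the final text is assembled from five small sentence-builder helpers instead of inline conditional blocks; A instead makes len() plus four independent sum-comprehension scans over the raw dicts.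
import Mathlib
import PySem

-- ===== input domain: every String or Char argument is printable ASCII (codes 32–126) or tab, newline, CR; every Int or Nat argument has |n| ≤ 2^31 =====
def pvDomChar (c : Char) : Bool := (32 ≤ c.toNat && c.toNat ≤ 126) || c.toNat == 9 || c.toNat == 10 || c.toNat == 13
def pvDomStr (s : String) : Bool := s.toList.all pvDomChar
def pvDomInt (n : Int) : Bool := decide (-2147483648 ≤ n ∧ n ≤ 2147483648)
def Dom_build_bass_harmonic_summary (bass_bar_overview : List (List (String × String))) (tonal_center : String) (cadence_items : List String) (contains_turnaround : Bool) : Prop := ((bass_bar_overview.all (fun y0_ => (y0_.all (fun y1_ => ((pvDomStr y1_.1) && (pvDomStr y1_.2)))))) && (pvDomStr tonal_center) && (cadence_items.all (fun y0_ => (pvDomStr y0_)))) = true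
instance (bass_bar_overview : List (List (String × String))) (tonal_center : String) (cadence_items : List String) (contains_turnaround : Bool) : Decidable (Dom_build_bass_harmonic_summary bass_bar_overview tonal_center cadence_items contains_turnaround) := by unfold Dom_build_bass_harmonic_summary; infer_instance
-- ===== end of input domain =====

-- B replaces A's len() + four sum-comprehension scans by a feature-matrix view (one 0/1 row per bar,
-- tallies = column sums of the transposed matrix) and five sentence-builder helpers (objective: alternative).

-- ===== PORT A =====
-- bar.get(k) / bar.get(k, d) on the Python dict a bar row denotes
def pvBarGet (bar : List (String × String)) (k : String) : Option String :=
  (PySem.Dict.ofList bar).get? k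
def pvBarGetD (bar : List (String × String)) (k d : String) : String :=
  (PySem.Dict.ofList bar).getD k d

def build_bass_harmonic_summary (bass_bar_overview : List (List (String × String))) (tonal_center : String) (cadence_items : List String) (contains_turnaround : Bool) : String :=
  if bass_bar_overview = [] then
    "Bass linija jos nije generisana, pa nema sire harmonijske veze za komentar."
  else
    let total_bars : Int := bass_bar_overview.length
    let root_anchors : Int :=
      (bass_bar_overview.countP (fun bar => pvBarGet bar "beat_one_role" == some "root") : Int)
    let guide_tone_bars : Int :=
      (bass_bar_overview.countP (fun bar => PySem.Str.isIn "guide tone emphasis" (pvBarGetD bar "bar_comment" "")) : Int)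
    let chromatic_bars : Int :=
      (bass_bar_overview.countP (fun bar => PySem.Str.isIn "chromatic" (pvBarGetD bar "bar_comment" "")) : Int)
    let approach_bars : Int :=
      (bass_bar_overview.countP (fun bar => pvBarGet bar "beat_four_role" == some "approach") : Int)
    let anchor_text :=
      if root_anchors = total_bars then
        "Bass linija na prvom beatu svakog takta jasno sidri koren akorda"
      else
        "Bass linija na prvom beatu potvrdjuje koren u " ++ PySem.Int.toStr root_anchors ++
          " od " ++ PySem.Int.toStr total_bars ++ " taktova"
    let anchor_text :=
      if tonal_center ≠ "" ∧ tonal_center ≠ "Nedovoljno podataka" then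
        anchor_text ++ ", pa tonalni centar " ++ tonal_center ++ " ostaje pregledan."
      else
        anchor_text ++ "."
    let voice_leading_text :=
      if guide_tone_bars ≠ 0 then
        "Srednji beatovi u " ++ PySem.Int.toStr guide_tone_bars ++
          " taktova naglasavaju guide tone kretanje, sto pomaze da se funkcija akorda cuje i bez pune pratnje."
      else
        "Srednji beatovi vise rade kao stabilna chord-tone podrska nego kao izrazena guide tone linija."
    let cadence_text :=
      match cadence_items with
      | c0 :: _ => "To posebno podrzava kadencu " ++ c0 ++ "."
      | [] =>
        if contains_turnaround then
          "Zavrsni tonovi pripremaju turnaround i drze liniju funkcionalno otvorenom."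
        else
          "Linija ostaje vise u funkciji stabilizacije harmonije nego eksplicitne kadence."
    let approach_text :=
      if approach_bars ≠ 0 then
        ("U " ++ PySem.Int.toStr approach_bars ++ " taktova cetvrti beat radi kao approach ton ka sledecem akordu") ++
          (if chromatic_bars ≠ 0 then ", pa prelazi zvuce povezano i usmereno."
           else ", pa prelazi ostaju glatki.")
      else
        "Zavrseci taktova ostaju unutar aktuelne harmonije umesto da guraju sledeci akord."
    PySem.Str.join " " [anchor_text, voice_leading_text, cadence_text, approach_text]

-- ===== PORT B =====
-- Source B's _bar_features: one 0/1 feature row per bar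
def pvBarFeatures (bar : List (String × String)) : Int × Int × Int × Int × Int :=
  let comment := pvBarGetD bar "bar_comment" ""
  (1,
   if pvBarGet bar "beat_one_role" == some "root" then 1 else 0,
   if PySem.Str.isIn "guide tone emphasis" comment then 1 else 0,
   if PySem.Str.isIn "chromatic" comment then 1 else 0,
   if pvBarGet bar "beat_four_role" == some "approach" then 1 else 0)

-- Source B's sentence-builder helpers
def pvAnchorSentence (roots total : Int) (tonal_center : String) : String :=
  let head :=
    if roots = total then
      "Bass linija na prvom beatu svakog takta jasno sidri koren akorda"
    else
      "Bass linija na prvom beatu potvrdjuje koren u " ++ PySem.Int.toStr roots ++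
        " od " ++ PySem.Int.toStr total ++ " taktova"
  let tail :=
    if tonal_center ≠ "" ∧ tonal_center ≠ "Nedovoljno podataka" then
      ", pa tonalni centar " ++ tonal_center ++ " ostaje pregledan."
    else "."
  head ++ tail

def pvVoiceSentence (guides : Int) : String :=
  if guides ≠ 0 then
    "Srednji beatovi u " ++ PySem.Int.toStr guides ++
      " taktova naglasavaju guide tone kretanje, sto pomaze da se funkcija akorda cuje i bez pune pratnje."
  else
    "Srednji beatovi vise rade kao stabilna chord-tone podrska nego kao izrazena guide tone linija."

def pvCadenceSentence (cadence_items : List String) (contains_turnaround : Bool) : String :=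
  match cadence_items with
  | c0 :: _ => "To posebno podrzava kadencu " ++ c0 ++ "."
  | [] =>
    if contains_turnaround then
      "Zavrsni tonovi pripremaju turnaround i drze liniju funkcionalno otvorenom."
    else
      "Linija ostaje vise u funkciji stabilizacije harmonije nego eksplicitne kadence."

def pvApproachSentence (approaches chroms : Int) : String :=
  if approaches ≠ 0 then
    ("U " ++ PySem.Int.toStr approaches ++ " taktova cetvrti beat radi kao approach ton ka sledecem akordu") ++
      (if chroms ≠ 0 then ", pa prelazi zvuce povezano i usmereno."
       else ", pa prelazi ostaju glatki.")
  else
    "Zavrseci taktova ostaju unutar aktuelne harmonije umesto da guraju sledeci akord."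

def build_bass_harmonic_summary_alt (bass_bar_overview : List (List (String × String))) (tonal_center : String) (cadence_items : List String) (contains_turnaround : Bool) : String :=
  if bass_bar_overview = [] then
    "Bass linija jos nije generisana, pa nema sire harmonijske veze za komentar."
  else
    -- feature matrix, transposed: tallies are the five column sums
    let feature_matrix := bass_bar_overview.map pvBarFeatures
    let total := (feature_matrix.map (fun r => r.1)).sum
    let roots := (feature_matrix.map (fun r => r.2.1)).sum
    let guides := (feature_matrix.map (fun r => r.2.2.1)).sum
    let chroms := (feature_matrix.map (fun r => r.2.2.2.1)).sum
    let approaches := (feature_matrix.map (fun r => r.2.2.2.2)).sum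
    PySem.Str.join " "
      [pvAnchorSentence roots total tonal_center,
       pvVoiceSentence guides,
       pvCadenceSentence cadence_items contains_turnaround,
       pvApproachSentence approaches chroms]

-- ===== PRECONDITION & SPEC =====
def Spec_build_bass_harmonic_summary (bass_bar_overview : List (List (String × String))) (tonal_center : String) (cadence_items : List String) (contains_turnaround : Bool) (out : String) : Prop := out = build_bass_harmonic_summary_alt bass_bar_overview tonal_center cadence_items contains_turnaround
instance (bass_bar_overview : List (List (String × String))) (tonal_center : String) (cadence_items : List String) (contains_turnaround : Bool) (out : String) : Decidable (Spec_build_bass_harmonic_summary bass_bar_overview tonal_center cadence_items contains_turnaround out) := by unfold Spec_build_bass_harmonic_summary; infer_instance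

-- ===== CLAIM =====
def Claim_equal_build_bass_harmonic_summary : Prop := ∀ (bass_bar_overview : List (List (String × String))) (tonal_center : String) (cadence_items : List String) (contains_turnaround : Bool), Dom_build_bass_harmonic_summary bass_bar_overview tonal_center cadence_items contains_turnaround → Spec_build_bass_harmonic_summary bass_bar_overview tonal_center cadence_items contains_turnaround (build_bass_harmonic_summary bass_bar_overview tonal_center cadence_items contains_turnaround)

-- ===== LEMMAS AND PROOFS =====

-- a column sum of 0/1 flags is a countP
theorem pv_sum_flags {α : Type} (l : List α) (p : α → Bool) :
    (l.map (fun x => if p x then (1 : Int) else 0)).sum = (l.countP p : Int) := by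
  induction l with
  | nil => simp
  | cons x xs ih =>
    simp only [List.map_cons, List.sum_cons, List.countP_cons, ih]
    by_cases hx : p x = true
    · simp only [hx, if_pos]; push_cast; omega
    · simp only [hx, if_neg, Bool.false_eq_true, not_false_iff]; push_cast; omega

-- the first column of the feature matrix sums to the length
theorem pv_sum_ones (l : List (List (String × String))) :
    ((l.map pvBarFeatures).map (fun r => r.1)).sum = (l.length : Int) := by
  induction l with
  | nil => simp
  | cons x xs ih =>
    simp only [List.map_cons, List.sum_cons, List.length_cons, ih]
    show (1 : Int) + (xs.length : Int) = ((xs.length + 1 : Nat) : Int)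
    push_cast; omega

-- each remaining column sum equals the corresponding countP of A
theorem pv_col_roots (l : List (List (String × String))) :
    ((l.map pvBarFeatures).map (fun r => r.2.1)).sum =
      (l.countP (fun bar => pvBarGet bar "beat_one_role" == some "root") : Int) := by
  rw [List.map_map]
  exact pv_sum_flags l (fun bar => pvBarGet bar "beat_one_role" == some "root")

theorem pv_col_guides (l : List (List (String × String))) :
    ((l.map pvBarFeatures).map (fun r => r.2.2.1)).sum =
      (l.countP (fun bar => PySem.Str.isIn "guide tone emphasis" (pvBarGetD bar "bar_comment" "")) : Int) := by
  rw [List.map_map]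
  exact pv_sum_flags l (fun bar => PySem.Str.isIn "guide tone emphasis" (pvBarGetD bar "bar_comment" ""))

theorem pv_col_chroms (l : List (List (String × String))) :
    ((l.map pvBarFeatures).map (fun r => r.2.2.2.1)).sum =
      (l.countP (fun bar => PySem.Str.isIn "chromatic" (pvBarGetD bar "bar_comment" "")) : Int) := by
  rw [List.map_map]
  exact pv_sum_flags l (fun bar => PySem.Str.isIn "chromatic" (pvBarGetD bar "bar_comment" ""))

theorem pv_col_approaches (l : List (List (String × String))) :
    ((l.map pvBarFeatures).map (fun r => r.2.2.2.2)).sum =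
      (l.countP (fun bar => pvBarGet bar "beat_four_role" == some "approach") : Int) := by
  rw [List.map_map]
  exact pv_sum_flags l (fun bar => pvBarGet bar "beat_four_role" == some "approach")

-- ===== VERDICT =====
theorem build_bass_harmonic_summary_spec : Claim_equal_build_bass_harmonic_summary := by
  intro bars tc ci ct _hdom
  unfold Spec_build_bass_harmonic_summary
  unfold build_bass_harmonic_summary build_bass_harmonic_summary_alt
  by_cases h : bars = []
  · rw [if_pos h, if_pos h]
  · rw [if_neg h, if_neg h]
    simp only [pv_sum_ones, pv_col_roots, pv_col_guides, pv_col_chroms, pv_col_approaches,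
      pvAnchorSentence, pvVoiceSentence, pvCadenceSentence, pvApproachSentence]
    refine congrArg (PySem.Str.join " ") ?_
    congr 1
    by_cases h2 : tc ≠ "" ∧ tc ≠ "Nedovoljno podataka"
    · rw [if_pos h2, if_pos h2]; simp only [String.append_assoc]
    · rw [if_neg h2, if_neg h2]
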